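-- pv_equiv track=rewrite | github.com/CaseyBandiola/Cheems-Bot | bot.py | cheemsify
-- ===== SOURCE A (Python) =====
-- def cheemsify(msg):
--     response = msg.split()
--     returnmsg = ""
--
--     # iterate through each word in the message
--     for i in range(len(response)):
--         # iterate through the word
--         # if word is less than or equal to 3 letters, skip it
--         if len(response[i]) <= 3:
--             if i != len(response) - 1:
--                 returnmsg += response[i] + " "
--             else:
--                 returnmsg += response[i]
--             continue
--         # otherwise, cheemsify the word
--         for j in range( len(response[i])-1 ):
--             if isVowel(response[i][j]) and isConsonant(response[i][j+1]):
--                 new_word = response[i][:j+1]+"m"+response[i][j+1:]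
--                 response[i] = new_word
--                 break
--
--         if i != len(response) - 1:
--             returnmsg += response[i] + " "
--         else:
--             returnmsg += response[i]
--
--     return returnmsg
--
-- def isVowel(char):
--     return char.lower() in 'aeiou'
--
-- def isConsonant(char):
--     return char.lower() in 'bcdfghjklnpqrstvxzwy'
-- ===== SOURCE B (Python) =====
-- VOWELS = 'aeiou'
-- CONSONANTS = 'bcdfghjklnpqrstvxzwy'
--
--
-- def cheemsify(msg):
--     # Single pass over the characters: accumulate the current word, remember the
--     # first vowel-consonant boundary as it appears, emit on each whitespace run.
--     out = []
--     word = []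
--     ins = None  # insertion index inside `word`, found incrementally
--
--     def flush():
--         nonlocal word, ins
--         if word:
--             if out:
--                 out.append(' ')
--             if ins is not None and len(word) > 3:
--                 out.extend(word[:ins])
--                 out.append('m')
--                 out.extend(word[ins:])
--             else:
--                 out.extend(word)
--             word = []
--             ins = None
--
--     for ch in msg:
--         if ch.isspace():
--             flush()
--         else:
--             if ins is None and word and word[-1].lower() in VOWELS and ch.lower() in CONSONANTS:
--                 ins = len(word)
--             word.append(ch)
--     flush()
--     return ''.join(out)
-- ===== Notes on version B (the rewrite author's own statement) =====
-- stated objective: alternative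
-- what changed: B replaces A's split-into-words plus per-word boundary rescan and index-based space bookkeeping by a single-pass character-stream automaton over the raw message that accumulates the current word, records the first vowel-consonant boundary incrementally as characters arrive, and flushes on whitespace runs.
import Mathlib
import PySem

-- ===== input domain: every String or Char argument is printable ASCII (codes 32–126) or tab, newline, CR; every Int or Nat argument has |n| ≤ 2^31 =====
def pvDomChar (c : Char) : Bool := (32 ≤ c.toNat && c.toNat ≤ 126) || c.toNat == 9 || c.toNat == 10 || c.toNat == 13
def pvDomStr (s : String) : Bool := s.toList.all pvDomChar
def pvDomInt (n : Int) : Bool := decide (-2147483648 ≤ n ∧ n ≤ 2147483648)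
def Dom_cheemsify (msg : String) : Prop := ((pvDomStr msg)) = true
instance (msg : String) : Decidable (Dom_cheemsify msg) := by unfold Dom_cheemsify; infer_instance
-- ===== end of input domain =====

-- B replaces A's split + per-word rescan + index-based space bookkeeping by a single-pass
-- character-stream automaton that finds each word's boundary incrementally (objective: alternative).

-- ===== PORT A =====
def isVowel (c : Char) : Bool :=
  PySem.Chars.isIn [PySem.Chars.lowerChar c] "aeiou".toList

def isConsonant (c : Char) : Bool :=
  PySem.Chars.isIn [PySem.Chars.lowerChar c] "bcdfghjklnpqrstvxzwy".toList

-- inner 'for j in range(len(w)-1): … break' loop of A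
def cheemsInner (w : List Char) : List Int → List Char
  | [] => w
  | j :: js =>
    if isVowel (PySem.List.pyGetD w j ' ') && isConsonant (PySem.List.pyGetD w (j + 1) ' ') then
      PySem.List.slice w none (some (j + 1)) ++ "m".toList ++ PySem.List.slice w (some (j + 1)) none
    else cheemsInner w js

-- one iteration of A's outer loop: state = (response, returnmsg)
def cheemsStep (st : List (List Char) × List Char) (i : Int) : List (List Char) × List Char :=
  let response := st.1
  let returnmsg := st.2
  let wi := PySem.List.pyGetD response i []
  if PySem.Chars.len wi ≤ 3 then
    if i ≠ (response.length : Int) - 1 then (response, returnmsg ++ wi ++ " ".toList)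
    else (response, returnmsg ++ wi)
  else
    let new_word := cheemsInner wi (PySem.List.pyRange 0 ((PySem.Chars.len wi : Int) - 1) 1)
    let response' := PySem.List.pySetD response i new_word
    if i ≠ (response'.length : Int) - 1 then (response', returnmsg ++ new_word ++ " ".toList)
    else (response', returnmsg ++ new_word)

def cheemsify (msg : String) : String :=
  let response := PySem.Chars.split₀ msg.toList
  String.ofList
    (((PySem.List.pyRange 0 (response.length : Int) 1).foldl cheemsStep (response, [])).2)

-- ===== PORT B =====
-- Source B's flush(): emit the pending word (with ' ' separator and the recorded insertion) into out
def bFlush (st : List Char × List Char × Option Nat) : List Char × List Char × Option Nat :=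
  let (out, word, ins) := st
  if word = [] then st
  else
    let out := if out = [] then out else out ++ [' ']
    let out :=
      match ins with
      | some j => if 3 < word.length then out ++ word.take j ++ 'm' :: word.drop j else out ++ word
      | none => out ++ word
    (out, [], none)

-- Source B's loop body: whitespace flushes; otherwise record the boundary (if first) and extend the word
def bStep (st : List Char × List Char × Option Nat) (ch : Char) : List Char × List Char × Option Nat :=
  if PySem.Chars.isspace ch then bFlush st
  else
    let (out, word, ins) := st
    let ins' :=
      match ins, word.getLast? with
      | none, some lc =>
        if PySem.Chars.lowerChar lc ∈ "aeiou".toList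
            && PySem.Chars.lowerChar ch ∈ "bcdfghjklnpqrstvxzwy".toList then
          some word.length
        else none
      | none, none => none
      | some j, _ => some j
    (out, word ++ [ch], ins')

def cheemsify_alt (msg : String) : String :=
  String.ofList (bFlush (msg.toList.foldl bStep ([], [], none))).1

-- ===== PRECONDITION & SPEC =====
def Spec_cheemsify (msg : String) (out : String) : Prop := out = cheemsify_alt msg
instance (msg : String) (out : String) : Decidable (Spec_cheemsify msg out) := by
  unfold Spec_cheemsify; infer_instance

-- ===== CLAIM (what is proved, stated in full; the proofs are below) =====
def Claim_equal_cheemsify : Prop := ∀ (msg : String), Dom_cheemsify msg → Spec_cheemsify msg (cheemsify msg)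

-- ===== LEMMAS AND PROOFS =====

-- proof-only helpers: character classes, per-word model, first boundary index
def isVowelB (c : Char) : Bool := PySem.Chars.lowerChar c ∈ "aeiou".toList

def isConsonantB (c : Char) : Bool := PySem.Chars.lowerChar c ∈ "bcdfghjklnpqrstvxzwy".toList

def vcIndex (j : Nat) : List Char → Option Nat
  | a :: b :: rest => if isVowelB a && isConsonantB b then some j else vcIndex (j + 1) (b :: rest)
  | _ => none

def cheemsWord (w : List Char) : List Char :=
  if w.length ≤ 3 then w
  else
    match vcIndex 0 w with
    | some j => w.take (j + 1) ++ 'm' :: w.drop (j + 1)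
    | none => w

theorem isIn_singleton (c : Char) (s : List Char) :
    PySem.Chars.isIn [c] s = decide (c ∈ s) := by
  rcases Bool.eq_false_or_eq_true (PySem.Chars.isIn [c] s) with h | h
  swap
  · rw [h]; rw [PySem.Chars.isIn_eq_false_iff] at h
    symm; simp only [decide_eq_false_iff_not]
    intro hm
    rcases List.append_of_mem hm with ⟨s1, s2, rfl⟩
    exact h ⟨s1, s2, by simp⟩
  · rw [h]; rw [PySem.Chars.isIn_iff_infix] at h
    symm; simp only [decide_eq_true_eq]
    exact h.sublist.subset (by simp)

theorem isVowel_eq (c : Char) : isVowel c = isVowelB c := by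
  unfold isVowel isVowelB
  rw [isIn_singleton]

theorem isConsonant_eq (c : Char) : isConsonant c = isConsonantB c := by
  unfold isConsonant isConsonantB
  rw [isIn_singleton]

theorem vcIndex_short (j : Nat) (l : List Char) (h : l.length ≤ 1) : vcIndex j l = none := by
  match l, h with
  | [], _ => rfl
  | [a], _ => rfl

theorem vcIndex_cons (j : Nat) (a b : Char) (rest : List Char) :
    vcIndex j (a :: b :: rest)
      = if isVowelB a && isConsonantB b then some j else vcIndex (j + 1) (b :: rest) := rfl

theorem inner_eq_aux (w : List Char) (n : Nat) :
    ∀ k : Nat, w.length - k ≤ n →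
    cheemsInner w (PySem.List.pyRange (k : Int) ((w.length : Int) - 1) 1)
      = (match vcIndex k (w.drop k) with
         | some j => w.take (j + 1) ++ 'm' :: w.drop (j + 1)
         | none => w) := by
  induction n with
  | zero =>
    intro k hk
    rw [PySem.List.pyRange_one_eq_nil (by omega)]
    rw [vcIndex_short k _ (by simp; omega)]
    rfl
  | succ n ih =>
    intro k hk
    by_cases hlt : k + 1 < w.length
    · have hk0 : k < w.length := by omega
      rw [PySem.List.pyRange_one_cons (by omega)]
      have hd1 : w.drop k = w[k] :: w.drop (k + 1) := List.drop_eq_getElem_cons hk0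
      have hd2 : w.drop (k + 1) = w[k + 1] :: w.drop (k + 2) := List.drop_eq_getElem_cons hlt
      have hget1 : PySem.List.pyGetD w (k : Int) ' ' = w[k] := by
        simp [PySem.List.pyGetD_natCast, List.getD_eq_getElem?_getD, hk0]
      have hget2 : PySem.List.pyGetD w ((k : Int) + 1) ' ' = w[k + 1] := by
        have h := PySem.List.pyGetD_natCast w (k + 1) ' '
        rw [show ((k + 1 : Nat) : Int) = (k : Int) + 1 by push_cast; ring] at h
        rw [h, List.getD_eq_getElem?_getD]
        simp [hlt]
      rw [show cheemsInner w ((k : Int) :: PySem.List.pyRange ((k : Int) + 1) ((w.length : Int) - 1) 1)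
            = if isVowel (PySem.List.pyGetD w (k : Int) ' ') && isConsonant (PySem.List.pyGetD w ((k : Int) + 1) ' ')
              then PySem.List.slice w none (some ((k : Int) + 1)) ++ "m".toList ++ PySem.List.slice w (some ((k : Int) + 1)) none
              else cheemsInner w (PySem.List.pyRange ((k : Int) + 1) ((w.length : Int) - 1) 1) from rfl]
      rw [hget1, hget2, isVowel_eq, isConsonant_eq]
      rw [hd1, hd2, vcIndex_cons, ← hd2]
      by_cases hc : isVowelB w[k] && isConsonantB w[k + 1]
      · simp only [hc, if_pos]
        have hcast : ((k : Int) + 1) = ((k + 1 : Nat) : Int) := by push_cast; ring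
        rw [hcast, PySem.List.slice_to_natCast, PySem.List.slice_from_natCast]
        simp
      · simp only [hc, Bool.false_eq_true, if_false]
        have hcast : ((k : Int) + 1) = ((k + 1 : Nat) : Int) := by push_cast; ring
        rw [hcast]
        exact ih (k + 1) (by omega)
    · rw [PySem.List.pyRange_one_eq_nil (by omega)]
      rw [vcIndex_short k _ (by simp; omega)]
      rfl

theorem inner_eq (w : List Char) (k : Nat) :
    cheemsInner w (PySem.List.pyRange (k : Int) ((w.length : Int) - 1) 1)
      = (match vcIndex k (w.drop k) with
         | some j => w.take (j + 1) ++ 'm' :: w.drop (j + 1)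
         | none => w) :=
  inner_eq_aux w (w.length - k) k le_rfl

-- the word transformation A applies at each position
def gA (w : List Char) : List Char :=
  if PySem.Chars.len w ≤ 3 then w
  else cheemsInner w (PySem.List.pyRange 0 ((PySem.Chars.len w : Int) - 1) 1)

theorem gA_eq_cheemsWord (w : List Char) : gA w = cheemsWord w := by
  unfold gA cheemsWord
  rw [PySem.Chars.len_eq]
  by_cases h : w.length ≤ 3
  · simp [h]
  · rw [if_neg (by exact_mod_cast h), if_neg h]
    have h0 := inner_eq w 0
    simp only [Nat.cast_zero, List.drop_zero] at h0
    exact h0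

-- A's "space after every word but the last"
def tailjoin : List (List Char) → List Char
  | [] => []
  | [w] => w
  | w :: rest => w ++ ' ' :: tailjoin rest

theorem tailjoin_cons (w : List Char) (rest : List (List Char)) (h : rest ≠ []) :
    tailjoin (w :: rest) = w ++ ' ' :: tailjoin rest := by
  cases rest with
  | nil => exact absurd rfl h
  | cons a l => rfl

theorem tailjoin_eq_join (ws : List (List Char)) :
    tailjoin ws = PySem.Chars.join [' '] ws := by
  induction ws with
  | nil => simp [tailjoin, PySem.Chars.join_nil]
  | cons w rest ih =>
    cases rest with
    | nil => simp [tailjoin, PySem.Chars.join_singleton]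
    | cons b l =>
      rw [tailjoin_cons w (b :: l) (by simp), PySem.Chars.join_cons_cons, ih]
      simp

theorem outer_eq_aux (ws : List (List Char)) (n : Nat) :
    ∀ (k : Nat) (resp : List (List Char)) (acc : List Char),
      ws.length - k ≤ n → resp.length = ws.length → resp.drop k = ws.drop k →
      ((PySem.List.pyRange (k : Int) (ws.length : Int) 1).foldl cheemsStep (resp, acc)).2
        = acc ++ tailjoin ((ws.drop k).map gA) := by
  induction n with
  | zero =>
    intro k resp acc hk hlen hsuff
    rw [PySem.List.pyRange_one_eq_nil (by omega), List.drop_eq_nil_of_le (by omega)]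
    simp [tailjoin]
  | succ n ih =>
    intro k resp acc hk hlen hsuff
    by_cases hklt : k < ws.length
    case neg =>
      rw [PySem.List.pyRange_one_eq_nil (by omega), List.drop_eq_nil_of_le (by omega)]
      simp [tailjoin]
    case pos =>
    rw [PySem.List.pyRange_one_cons (by omega), List.foldl_cons]
    have hkr : k < resp.length := by omega
    have hgetk : resp[k]'hkr = ws[k]'hklt := by
      have h0 := congrArg (fun l => l[0]?) hsuff
      simpa [List.getElem?_drop, List.getElem?_eq_getElem, hkr, hklt] using h0
    have hwi : PySem.List.pyGetD resp (k : Int) [] = ws[k]'hklt := by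
      rw [PySem.List.pyGetD_natCast, List.getD_eq_getElem?_getD]
      simp [hkr, hgetk]
    have hdropsucc : resp.drop (k + 1) = ws.drop (k + 1) := by
      have h1 := congrArg (List.drop 1) hsuff
      simpa [List.drop_drop, Nat.add_comm] using h1
    have hdk : ws.drop k = ws[k]'hklt :: ws.drop (k + 1) := List.drop_eq_getElem_cons hklt
    have hcast : ((k : Int) + 1) = ((k + 1 : Nat) : Int) := by push_cast; ring
    simp only [cheemsStep, hwi]
    by_cases h3 : PySem.Chars.len (ws[k]'hklt) ≤ 3
    · rw [if_pos h3]
      have hga : gA (ws[k]'hklt) = ws[k]'hklt := by unfold gA; rw [if_pos h3]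
      by_cases hlast : k + 1 = ws.length
      · rw [if_neg (by omega)]
        rw [hcast, PySem.List.pyRange_one_eq_nil (by omega)]
        rw [hdk, List.drop_eq_nil_of_le (by omega)]
        simp [tailjoin, hga]
      · rw [if_pos (by omega)]
        rw [hcast, ih (k + 1) resp _ (by omega) hlen hdropsucc]
        rw [hdk]
        simp only [List.map_cons]
        rw [tailjoin_cons _ _ (by
          simp only [ne_eq, List.map_eq_nil_iff]
          intro hnil
          have := congrArg List.length hnil
          simp at this; omega)]
        simp [hga, List.append_assoc]
    · rw [if_neg h3]
      have hga : gA (ws[k]'hklt)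
          = cheemsInner (ws[k]'hklt) (PySem.List.pyRange 0 ((PySem.Chars.len (ws[k]'hklt) : Int) - 1) 1) := by
        unfold gA; rw [if_neg h3]
      rw [← hga]
      simp only [PySem.List.pySetD_natCast, List.length_set]
      have hdropset : (resp.set k (gA (ws[k]'hklt))).drop (k + 1) = ws.drop (k + 1) := by
        rw [← hdropsucc]
        apply List.ext_getElem?
        intro i
        rw [List.getElem?_drop, List.getElem?_drop, List.getElem?_set_ne (by omega)]
      by_cases hlast : k + 1 = ws.length
      · rw [if_neg (by omega)]
        rw [hcast, PySem.List.pyRange_one_eq_nil (by omega)]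
        rw [hdk, List.drop_eq_nil_of_le (by omega)]
        simp [tailjoin]
      · rw [if_pos (by omega)]
        rw [hcast, ih (k + 1) _ _ (by omega) (by simpa using hlen) hdropset]
        rw [hdk]
        simp only [List.map_cons]
        rw [tailjoin_cons _ _ (by
          simp only [ne_eq, List.map_eq_nil_iff]
          intro hnil
          have := congrArg List.length hnil
          simp at this; omega)]
        simp [List.append_assoc]

theorem outer_eq (ws : List (List Char)) (resp : List (List Char)) (k : Nat) (acc : List Char)
    (hlen : resp.length = ws.length) (hsuff : resp.drop k = ws.drop k) :
    ((PySem.List.pyRange (k : Int) (ws.length : Int) 1).foldl cheemsStep (resp, acc)).2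
      = acc ++ tailjoin ((ws.drop k).map gA) :=
  outer_eq_aux ws (ws.length - k) k resp acc le_rfl hlen hsuff

-- A's result, in model form
theorem cheemsify_model (msg : String) :
    cheemsify msg
      = String.ofList (PySem.Chars.join [' '] ((PySem.Chars.split₀ msg.toList).map cheemsWord)) := by
  unfold cheemsify
  have h := outer_eq (PySem.Chars.split₀ msg.toList) (PySem.Chars.split₀ msg.toList) 0 [] rfl rfl
  simp only [Nat.cast_zero] at h
  simp only [h, List.drop_zero, List.nil_append, tailjoin_eq_join]
  exact congrArg (fun l => String.ofList (PySem.Chars.join [' '] l))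
    (List.map_congr_left fun w _ => gA_eq_cheemsWord w)

-- ===== B-side proofs =====

-- emitting a sequence of words the way bFlush does
def appendWord (out w : List Char) : List Char :=
  (if out = [] then out else out ++ [' ']) ++ cheemsWord w

def FF (out : List Char) (ws : List (List Char)) : List Char :=
  ws.foldl appendWord out

theorem FF_cons (out : List Char) (w : List Char) (ws : List (List Char)) :
    FF out (w :: ws) = FF (appendWord out w) ws := rfl

theorem bFlush_eq (out word : List Char) (ins : Option Nat)
    (h : ins = (vcIndex 0 word).map (· + 1)) (hw : word ≠ []) :
    bFlush (out, word, ins) = (appendWord out word, [], none) := by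
  subst h
  unfold bFlush appendWord cheemsWord
  simp only [if_neg hw]
  cases hv : vcIndex 0 word with
  | none => simp
  | some j =>
    simp only [Option.map_some]
    by_cases h3 : 3 < word.length
    · rw [if_neg (show ¬ word.length ≤ 3 by omega), if_pos h3]
      simp [List.append_assoc]
    · rw [if_pos (show word.length ≤ 3 by omega), if_neg h3]

theorem vcIndex_snoc (w : List Char) (c : Char) : ∀ j : Nat,
    vcIndex j (w ++ [c])
      = (match vcIndex j w, w.getLast? with
         | some i, _ => some i
         | none, some lc =>
           if isVowelB lc && isConsonantB c then some (j + w.length - 1) else none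
         | none, none => none) := by
  induction w with
  | nil => intro j; simp [vcIndex]
  | cons a t ih =>
    intro j
    cases t with
    | nil =>
      simp only [List.cons_append, List.nil_append]
      rw [vcIndex_cons]
      by_cases hc : isVowelB a && isConsonantB c
      · simp [vcIndex, hc]
      · simp [vcIndex, hc]
    | cons b rest =>
      simp only [List.cons_append]
      rw [vcIndex_cons, vcIndex_cons]
      by_cases hab : isVowelB a && isConsonantB b
      · simp [hab]
      · simp only [hab, Bool.false_eq_true, if_false]
        have hih := ih (j + 1)
        rw [List.cons_append] at hih
        rw [hih]
        have hlast : (a :: b :: rest).getLast? = (b :: rest).getLast? := List.getLast?_cons_cons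
        cases hv : vcIndex (j + 1) (b :: rest) with
        | some i => simp
        | none =>
          simp only [hlast]
          cases hl : (b :: rest).getLast? with
          | none => simp at hl
          | some lc =>
            by_cases hvc : isVowelB lc && isConsonantB c
            · simp only [hvc, if_pos]
              congr 1
              simp only [List.length_cons]
              omega
            · simp [hvc]

theorem go_acc (cs : List Char) : ∀ (cur : List Char) (acc : List (List Char)),
    PySem.Chars.split₀.go cs cur acc = acc.reverse ++ PySem.Chars.split₀.go cs cur [] := by
  induction cs with
  | nil =>
    intro cur acc
    simp only [PySem.Chars.split₀.go]
    by_cases h : cur.isEmpty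
    · simp [h]
    · simp [h]
  | cons c cs ih =>
    intro cur acc
    simp only [PySem.Chars.split₀.go]
    by_cases hs : PySem.Chars.isspace c
    · simp only [hs, if_pos]
      by_cases h : cur.isEmpty
      · simp only [h, if_pos]
        exact ih [] acc
      · simp only [h, Bool.false_eq_true, if_false]
        rw [ih [] (cur.reverse :: acc), ih [] [cur.reverse]]
        simp
    · simp only [hs, Bool.false_eq_true, if_false]
      exact ih (c :: cur) acc

theorem go_not_nil (cs : List Char) : ∀ (cur : List Char),
    [] ∉ PySem.Chars.split₀.go cs cur [] := by
  induction cs with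
  | nil =>
    intro cur
    simp only [PySem.Chars.split₀.go]
    by_cases h : cur.isEmpty
    · simp [h]
    · simp only [h, Bool.false_eq_true, if_false, List.reverse_cons]
      replace h : cur ≠ [] := fun a => h (List.isEmpty_iff.mpr a)
      simp [h]
  | cons c cs ih =>
    intro cur
    simp only [PySem.Chars.split₀.go]
    by_cases hs : PySem.Chars.isspace c
    · simp only [hs, if_pos]
      by_cases h : cur.isEmpty
      · simp only [h, if_pos]; exact ih []
      · simp only [h, Bool.false_eq_true, if_false]
        rw [go_acc]
        replace h : cur ≠ [] := fun a => h (List.isEmpty_iff.mpr a)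
        intro hmem
        rcases List.mem_append.mp hmem with hm | hm
        · simp at hm; exact h hm
        · exact ih [] hm
    · simp only [hs, Bool.false_eq_true, if_false]
      exact ih (c :: cur)

theorem bStep_space (st : List Char × List Char × Option Nat) (ch : Char)
    (h : PySem.Chars.isspace ch = true) : bStep st ch = bFlush st := by
  unfold bStep; rw [if_pos h]

def nextIns (ins : Option Nat) (word : List Char) (c : Char) : Option Nat :=
  match ins, word.getLast? with
  | none, some lc =>
    if PySem.Chars.lowerChar lc ∈ "aeiou".toList
        && PySem.Chars.lowerChar c ∈ "bcdfghjklnpqrstvxzwy".toList then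
      some word.length
    else none
  | none, none => none
  | some j, _ => some j

theorem bStep_char (out word : List Char) (ins : Option Nat) (c : Char)
    (h : PySem.Chars.isspace c = false) :
    bStep (out, word, ins) c = (out, word ++ [c], nextIns ins word c) := by
  unfold bStep nextIns
  rw [if_neg (by simp [h])]

theorem nextIns_eq (word : List Char) (c : Char) (ins : Option Nat)
    (h : ins = (vcIndex 0 word).map (· + 1)) :
    nextIns ins word c = (vcIndex 0 (word ++ [c])).map (· + 1) := by
  subst h
  unfold nextIns
  rw [vcIndex_snoc word c 0]
  cases hv : vcIndex 0 word with
  | some j => simp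
  | none =>
    simp only [Option.map_none]
    cases hl : word.getLast? with
    | none => simp
    | some lc =>
      have hwne : word ≠ [] := by
        intro hx; subst hx; simp at hl
      by_cases hvc : isVowelB lc && isConsonantB c
      · have hb : (PySem.Chars.lowerChar lc ∈ "aeiou".toList
            && PySem.Chars.lowerChar c ∈ "bcdfghjklnpqrstvxzwy".toList) = true := by
          simpa [isVowelB, isConsonantB] using hvc
        simp only [hvc, if_pos, hb, Option.map_some]
        congr 1
        have : 1 ≤ word.length := List.length_pos_iff.mpr hwne
        omega
      · have hb : (PySem.Chars.lowerChar lc ∈ "aeiou".toList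
            && PySem.Chars.lowerChar c ∈ "bcdfghjklnpqrstvxzwy".toList) = false := by
          simpa [isVowelB, isConsonantB] using hvc
        rw [Bool.not_eq_true] at hvc
        simp only [hb, hvc, Bool.false_eq_true, if_false, Option.map_none]

theorem stream_eq (cs : List Char) : ∀ (out word : List Char) (ins : Option Nat),
    ins = (vcIndex 0 word).map (· + 1) →
    (bFlush (cs.foldl bStep (out, word, ins))).1
      = FF out (PySem.Chars.split₀.go cs word.reverse []) := by
  induction cs with
  | nil =>
    intro out word ins h
    simp only [List.foldl_nil, PySem.Chars.split₀.go]
    by_cases hw : word = []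
    · subst hw
      simp [bFlush, FF, h]
    · rw [bFlush_eq out word ins h hw]
      rw [if_neg (show ¬ (word.reverse).isEmpty = true from
        fun a => hw (by simpa using List.isEmpty_iff.mp a))]
      simp [FF, appendWord]
  | cons c cs ih =>
    intro out word ins h
    simp only [List.foldl_cons, PySem.Chars.split₀.go]
    by_cases hs : PySem.Chars.isspace c
    · rw [bStep_space _ _ hs]
      rw [if_pos hs]
      by_cases hw : word = []
      · subst hw
        have hins : ins = none := by simpa [vcIndex] using h
        subst hins
        rw [show bFlush (out, ([] : List Char), (none : Option Nat)) = (out, [], none) from rfl]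
        rw [if_pos (by simp)]
        exact ih out [] none (by simp [vcIndex])
      · rw [bFlush_eq out word ins h hw]
        rw [if_neg (show ¬ (word.reverse).isEmpty = true from
          fun a => hw (by simpa using List.isEmpty_iff.mp a))]
        simp only [List.reverse_reverse]
        rw [go_acc cs [] [word]]
        simp only [List.reverse_cons, List.reverse_nil, List.nil_append]
        rw [ih (appendWord out word) [] none (by simp [vcIndex])]
        simp only [List.reverse_nil]
        rw [List.singleton_append, FF_cons]
    · rw [bStep_char out word ins c (by simpa using hs)]
      rw [if_neg (by simp [hs])]
      have hins' : nextIns ins word c = (vcIndex 0 (word ++ [c])).map (· + 1) :=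
        nextIns_eq word c ins h
      rw [hins', ih out (word ++ [c]) _ rfl]
      have hrev : (word ++ [c]).reverse = c :: word.reverse := by simp
      rw [hrev]

theorem FF_pos (ws : List (List Char)) : ∀ (out : List Char), out ≠ [] →
    FF out ws = out ++ (ws.map (fun w => ' ' :: cheemsWord w)).flatten := by
  induction ws with
  | nil => intro out _; simp [FF]
  | cons w ws ih =>
    intro out hout
    rw [FF_cons]
    have hne : appendWord out w ≠ [] := by
      unfold appendWord
      simp [hout]
    rw [ih _ hne]
    unfold appendWord
    simp [hout, List.append_assoc]

theorem join_space (w : List Char) (ws : List (List Char)) :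
    PySem.Chars.join [' '] (w :: ws) = w ++ (ws.map (fun v => ' ' :: v)).flatten := by
  induction ws generalizing w with
  | nil => simp [PySem.Chars.join_singleton]
  | cons b l ih =>
    rw [PySem.Chars.join_cons_cons, ih b]
    simp [List.append_assoc]

theorem cheemsWord_ne_nil (w : List Char) (h : w ≠ []) : cheemsWord w ≠ [] := by
  unfold cheemsWord
  by_cases h3 : w.length ≤ 3
  · simpa [h3]
  · rw [if_neg h3]
    cases vcIndex 0 w with
    | none => simpa
    | some j => simp

theorem FF_join (ws : List (List Char)) (h : [] ∉ ws) :
    FF [] ws = PySem.Chars.join [' '] (ws.map cheemsWord) := by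
  cases ws with
  | nil => simp [FF, PySem.Chars.join_nil]
  | cons w ws =>
    have hw : w ≠ [] := fun hx => h (by simp [hx])
    rw [FF_cons]
    have : appendWord [] w = cheemsWord w := by unfold appendWord; simp
    rw [this]
    rw [FF_pos ws (cheemsWord w) (cheemsWord_ne_nil w hw)]
    rw [List.map_cons, join_space]
    simp [Function.comp_def]

-- B's result, in the same model form
theorem cheemsify_alt_model (msg : String) :
    cheemsify_alt msg
      = String.ofList (PySem.Chars.join [' '] ((PySem.Chars.split₀ msg.toList).map cheemsWord)) := by
  unfold cheemsify_alt
  rw [stream_eq msg.toList [] [] none (by simp [vcIndex])]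
  simp only [List.reverse_nil]
  rw [FF_join _ (go_not_nil msg.toList [])]
  rfl

-- ===== VERDICT (by name: the statement is the Claim_ definition above) =====
theorem cheemsify_spec : Claim_equal_cheemsify := by
  intro msg _
  unfold Spec_cheemsify
  rw [cheemsify_model, cheemsify_alt_model]
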